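-- pv_equiv track=rewrite | github.com/rossica/wordle_tool | wordle_tool.py | multiple_letter_stats
-- ===== SOURCE A (Python) =====
-- def IsLetter(letter):
--     return ord("A") <= ord(letter) <= ord("Z")
--
-- def word2dict(word):
--     d = dict()
--     for c in word:
--         if IsLetter(c):
--             if c in d:
--                 d[c] += 1
--             else:
--                 d[c] = 1
--     return d
--
-- def multiple_letter_stats(words):
--     """
--     Counts the number of words in 'words' that contain multiple letters.
--
--     Parameters:
--     words (list): a list of words.
--
--     Returns:
--     list(int): A 26-element list (corresponding to 26 letters in the English alphabet; 0=A, 25=Z)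
--     where each index contains the count of words that contain more than one occurrence of the letter.
--     """
--     letters = [0] * 26
--     for word in words:
--         d = word2dict(word)
--         for c,count in d.items():
--             if count > 1:
--                 letters[ord(c) - ord('A')] +=  1
--     return letters
-- ===== SOURCE B (Python) =====
-- def multiple_letter_stats(words):
--     letters = []
--     for i in range(26):
--         letter = chr(ord('A') + i)
--         n = 0
--         for word in words:
--             if word.count(letter) > 1:
--                 n += 1
--         letters.append(n)
--     return letters
-- ===== Notes on version B (the rewrite author's own statement) =====
-- stated objective: alternative
-- what changed: B drops the per-word frequency dict entirely: it loops over the 26 target letters and, for each, scans the words counting those with str.count(letter) > 1, maintaining only the running per-letter tally.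
import Mathlib
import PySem

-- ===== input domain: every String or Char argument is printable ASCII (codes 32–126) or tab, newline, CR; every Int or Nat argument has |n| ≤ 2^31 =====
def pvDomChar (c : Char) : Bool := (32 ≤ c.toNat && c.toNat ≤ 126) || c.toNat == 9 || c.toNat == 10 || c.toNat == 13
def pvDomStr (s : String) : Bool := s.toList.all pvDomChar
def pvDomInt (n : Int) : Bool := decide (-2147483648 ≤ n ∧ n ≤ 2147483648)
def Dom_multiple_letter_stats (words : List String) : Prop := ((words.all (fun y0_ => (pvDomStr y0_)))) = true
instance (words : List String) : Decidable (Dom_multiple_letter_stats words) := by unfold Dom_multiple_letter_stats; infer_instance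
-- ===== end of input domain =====

-- B replaces A's per-word letter-frequency dict by an outer loop over the 26 target
-- letters with an inner scan of the words using str.count (objective: alternative).

-- ===== PORT A =====
def pvIsLetter (c : Char) : Bool := 65 ≤ c.toNat && c.toNat ≤ 90

def pvWord2dict (word : String) : PySem.Dict Char Int :=
  word.toList.foldl
    (fun d c =>
      if pvIsLetter c then
        if d.contains c then d.insert c (d.getD c 0 + 1) else d.insert c 1
      else d)
    PySem.Dict.empty

def multiple_letter_stats (words : List String) : List Int :=
  words.foldl
    (fun letters word =>
      (pvWord2dict word).items.foldl
        (fun letters p =>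
          -- letters[ord(c) - ord('A')] += 1 : the key is an uppercase letter, so the
          -- index is always in range and Python's item assignment never raises
          if p.2 > 1 then
            PySem.List.pySetD letters ((p.1.toNat : Int) - 65)
              (PySem.List.pyGetD letters ((p.1.toNat : Int) - 65) 0 + 1)
          else letters)
        letters)
    (List.replicate 26 (0 : Int))

-- ===== PORT B =====
def multiple_letter_stats_alt (words : List String) : List Int :=
  (PySem.List.pyRange 0 26 1).foldl
    (fun letters i =>
      -- chr(ord('A') + i): i ranges over 0..25 so (65 + i).toNat is exact
      letters ++ [words.foldl
        (fun n word =>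
          if PySem.Str.count word (String.ofList [Char.ofNat (65 + i).toNat]) > 1 then n + 1 else n)
        (0 : Int)])
    []

-- ===== PRECONDITION & SPEC =====
def Spec_multiple_letter_stats (words : List String) (out : List Int) : Prop := out = multiple_letter_stats_alt words
instance (words : List String) (out : List Int) : Decidable (Spec_multiple_letter_stats words out) := by unfold Spec_multiple_letter_stats; infer_instance

-- ===== CLAIM (what is proved, stated in full; the proofs are below) =====
def Claim_equal_multiple_letter_stats : Prop := ∀ (words : List String), Dom_multiple_letter_stats words → Spec_multiple_letter_stats words (multiple_letter_stats words)

-- ===== LEMMAS AND PROOFS =====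

-- the per-word predicate both programs count: word contains letter chr(65+k) more than once
def pvHasDouble (k : Nat) (w : String) : Bool := decide (1 < w.toList.count (Char.ofNat (65 + k)))

theorem pvStep_eq (d : PySem.Dict Char Int) (c : Char) :
    (if d.contains c then d.insert c (d.getD c 0 + 1) else d.insert c 1)
      = d.insert c (d.getD c 0 + 1) := by
  by_cases h : d.contains c = true
  · simp [h]
  · have : d.get? c = none := by
      rw [PySem.Dict.get?_eq_none_iff_contains]; simpa using h
    simp [h, PySem.Dict.getD, this]

theorem pvWord2dict_eq (w : String) :
    pvWord2dict w = PySem.Dict.counter (w.toList.filter pvIsLetter) := by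
  unfold pvWord2dict
  rw [← PySem.Dict.foldl_insert_getD_add_one_eq_counter,
      ← PySem.List.foldl_if_eq_foldl_filter]
  congr 1
  funext d c
  by_cases h : pvIsLetter c = true <;> simp [h, pvStep_eq]

theorem pvCount_go_singleton (c : Char) (l : List Char) : ∀ (fuel acc : Nat), l.length ≤ fuel →
    PySem.Chars.count.go [c] fuel l acc = acc + l.count c := by
  induction l with
  | nil => intro fuel acc h; cases fuel <;> simp [PySem.Chars.count.go]
  | cons h t ih =>
    intro fuel acc hf
    cases fuel with
    | zero => simp at hf
    | succ n =>
      rw [PySem.Chars.count.go]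
      have hf' : t.length ≤ n := by simpa using hf
      by_cases hc : c = h
      · subst hc
        simp only [List.isPrefixOf, BEq.rfl, Bool.true_and, if_true, List.length_singleton,
          List.drop_one, List.tail_cons]
        rw [ih n (acc+1) hf']
        simp
        omega
      · have hpre : ([c].isPrefixOf (h :: t)) = false := by
          simp [List.isPrefixOf]
          exact fun hh => hc hh
        rw [hpre]
        simp only [Bool.false_eq_true, if_false]
        rw [ih n acc hf']
        simp [Ne.symm hc]

-- Python str.count of a single character is that character's count
theorem pvCount_singleton (cs : List Char) (c : Char) :
    PySem.Chars.count cs [c] = cs.count c := by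
  rw [PySem.Chars.count]
  simp [pvCount_go_singleton c cs cs.length 0 le_rfl]

theorem pvToNat_ofNat (k : Nat) (hk : k < 26) : (Char.ofNat (65 + k)).toNat = 65 + k := by
  have h : Nat.isValidChar (65 + k) := Or.inl (by omega)
  rw [Char.ofNat, dif_pos h]
  rfl

theorem pvEqC (c : Char) (hc : pvIsLetter c = true) (k : Nat) (hk : k < 26) :
    (c = Char.ofNat (65 + k)) ↔ c.toNat - 65 = k := by
  simp [pvIsLetter] at hc
  constructor
  · rintro rfl; rw [pvToNat_ofNat k hk]; omega
  · intro h
    have : c.toNat = 65 + k := by omega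
    rw [← Char.ofNat_toNat c, this]

theorem pvFold_length (items : List (Char × Int)) (L : List Int) :
    (items.foldl
        (fun letters p =>
          if p.2 > 1 then
            PySem.List.pySetD letters ((p.1.toNat : Int) - 65)
              (PySem.List.pyGetD letters ((p.1.toNat : Int) - 65) 0 + 1)
          else letters) L).length = L.length := by
  induction items generalizing L with
  | nil => rfl
  | cons p rest ih =>
    simp only [List.foldl_cons]
    rw [ih]
    split
    · exact PySem.List.length_pySetD _ _ _
    · rfl

theorem pvFold_map_getD (cnt : Char → Int) (S : List Char) :
    ∀ (L : List Int), L.length = 26 → S.Nodup → (∀ c ∈ S, pvIsLetter c = true) →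
    ∀ k, k < 26 →
    ((S.map (fun c => (c, cnt c))).foldl
        (fun letters p =>
          if p.2 > 1 then
            PySem.List.pySetD letters ((p.1.toNat : Int) - 65)
              (PySem.List.pyGetD letters ((p.1.toNat : Int) - 65) 0 + 1)
          else letters) L).getD k 0
      = L.getD k 0 +
          (if Char.ofNat (65 + k) ∈ S ∧ 1 < cnt (Char.ofNat (65 + k)) then 1 else 0) := by
  induction S with
  | nil => intro L hL _ _ k hk; simp
  | cons c S' ih =>
    intro L hL hnd hlet k hk
    have hc : pvIsLetter c = true := hlet c (List.mem_cons_self)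
    have hcb : 65 ≤ c.toNat ∧ c.toNat ≤ 90 := by simpa [pvIsLetter] using hc
    set j : Nat := c.toNat - 65 with hj
    have hjlt : j < 26 := by omega
    have hidx : ((c.toNat : Int) - 65) = (j : Int) := by omega
    have hset : (L.set j (L.getD j 0 + 1)).length = 26 := by rw [List.length_set]; exact hL
    have hL' : (if cnt c > 1 then
            PySem.List.pySetD L ((c.toNat : Int) - 65)
              (PySem.List.pyGetD L ((c.toNat : Int) - 65) 0 + 1)
          else L).length = 26 := by
      rw [hidx, PySem.List.pySetD_natCast, PySem.List.pyGetD_natCast]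
      split
      · exact hset
      · exact hL
    simp only [List.map_cons, List.foldl_cons]
    rw [ih _ hL' (hnd.of_cons) (fun x hx => hlet x (List.mem_cons_of_mem _ hx)) k hk]
    have hupd : (if cnt c > 1 then
            PySem.List.pySetD L ((c.toNat : Int) - 65)
              (PySem.List.pyGetD L ((c.toNat : Int) - 65) 0 + 1)
          else L).getD k 0
        = L.getD k 0 + (if c = Char.ofNat (65 + k) ∧ 1 < cnt c then 1 else 0) := by
      rw [hidx, PySem.List.pySetD_natCast, PySem.List.pyGetD_natCast]
      by_cases hgt : cnt c > 1
      · rw [if_pos hgt]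
        by_cases hjk : j = k
        · subst hjk
          rw [if_pos ⟨(pvEqC c hc j hjlt).mpr rfl, hgt⟩]
          rw [List.getD_eq_getElem _ _ (by rw [hset]; omega)]
          rw [List.getElem_set_self (by rw [hset]; omega)]
        · rw [if_neg (by rintro ⟨h1, _⟩; exact hjk ((pvEqC c hc k hk).mp h1)), add_zero]
          rw [List.getD_eq_getElem _ _ (by rw [hset]; omega)]
          rw [List.getElem_set_ne (by omega)]
          exact (List.getD_eq_getElem _ _ (by rw [hL]; omega)).symm
      · rw [if_neg hgt, if_neg (by rintro ⟨_, h2⟩; exact hgt h2), add_zero]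
    rw [hupd]
    by_cases hmem : c = Char.ofNat (65 + k)
    · have hnotin : Char.ofNat (65 + k) ∉ S' := hmem ▸ (List.nodup_cons.mp hnd).1
      rw [← hmem]
      simp only [List.mem_cons]
      by_cases hg : 1 < cnt c <;> simp [hg, ← hmem] at hnotin ⊢ <;> omega
    · have hC : Char.ofNat (65 + k) ≠ c := fun h => hmem h.symm
      simp only [List.mem_cons]
      rw [if_neg (by rintro ⟨h1, _⟩; exact hmem h1), add_zero]
      simp [hC]

-- the inner (per-word) fold of A, pointwise
theorem pvInner_getD (w : String) (L : List Int) (hL : L.length = 26) (k : Nat) (hk : k < 26) :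
    ((pvWord2dict w).items.foldl
        (fun letters p =>
          if p.2 > 1 then
            PySem.List.pySetD letters ((p.1.toNat : Int) - 65)
              (PySem.List.pyGetD letters ((p.1.toNat : Int) - 65) 0 + 1)
          else letters) L).getD k 0
      = L.getD k 0 + (if pvHasDouble k w then 1 else 0) := by
  rw [pvWord2dict_eq, PySem.Dict.items_counter]
  set fl := w.toList.filter pvIsLetter with hfl
  rw [pvFold_map_getD (fun c => (fl.count c : Int)) (PySem.Set.ofList fl) L hL
      (PySem.Set.nodup_ofList fl)
      (fun c hc => List.of_mem_filter ((PySem.Set.mem_ofList _ _).mp hc)) k hk]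
  congr 1
  have hCk : pvIsLetter (Char.ofNat (65 + k)) = true := by
    simp [pvIsLetter, pvToNat_ofNat k hk]
    omega
  have hcnt : fl.count (Char.ofNat (65 + k)) = w.toList.count (Char.ofNat (65 + k)) := by
    rw [hfl, List.count_filter hCk]
  by_cases hd : pvHasDouble k w = true
  · have h1 : 1 < w.toList.count (Char.ofNat (65 + k)) := by simpa [pvHasDouble] using hd
    have hmem : Char.ofNat (65 + k) ∈ PySem.Set.ofList fl := by
      rw [PySem.Set.mem_ofList _ _, ← List.count_pos_iff, hcnt]; omega
    rw [if_pos ⟨hmem, by rw [hcnt]; exact_mod_cast h1⟩, if_pos hd]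
  · have h1 : ¬ 1 < w.toList.count (Char.ofNat (65 + k)) := by simpa [pvHasDouble] using hd
    rw [if_neg (by rintro ⟨_, h2⟩; rw [hcnt] at h2; exact h1 (by exact_mod_cast h2)),
        if_neg hd]

-- A's outer loop, pointwise
theorem pvOuter_getD (words : List String) :
    ∀ (L : List Int), L.length = 26 → ∀ k, k < 26 →
    (words.foldl
        (fun letters word =>
          (pvWord2dict word).items.foldl
            (fun letters p =>
              if p.2 > 1 then
                PySem.List.pySetD letters ((p.1.toNat : Int) - 65)
                  (PySem.List.pyGetD letters ((p.1.toNat : Int) - 65) 0 + 1)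
              else letters)
            letters) L).getD k 0
      = L.getD k 0 + (words.countP (pvHasDouble k) : Int) := by
  induction words with
  | nil => intro L hL k hk; simp
  | cons w ws ih =>
    intro L hL k hk
    simp only [List.foldl_cons]
    rw [ih _ (by rw [pvFold_length]; exact hL) k hk, pvInner_getD w L hL k hk,
        List.countP_cons]
    by_cases hd : pvHasDouble k w = true <;> simp [hd] <;> ring

theorem pvA_getD (words : List String) (k : Nat) (hk : k < 26) :
    (multiple_letter_stats words).getD k 0 = (words.countP (pvHasDouble k) : Int) := by
  unfold multiple_letter_stats
  rw [pvOuter_getD words _ (List.length_replicate) k hk,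
      List.getD_eq_getElem _ _ (by simpa using hk),
      List.getElem_replicate]
  simp

theorem pvOuter_length (words : List String) :
    ∀ (L : List Int),
    (words.foldl
        (fun letters word =>
          (pvWord2dict word).items.foldl
            (fun letters p =>
              if p.2 > 1 then
                PySem.List.pySetD letters ((p.1.toNat : Int) - 65)
                  (PySem.List.pyGetD letters ((p.1.toNat : Int) - 65) 0 + 1)
              else letters)
            letters) L).length = L.length := by
  induction words with
  | nil => intro L; rfl
  | cons w ws ih =>
    intro L
    simp only [List.foldl_cons]
    rw [ih, pvFold_length]

theorem pvA_length (words : List String) : (multiple_letter_stats words).length = 26 := by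
  unfold multiple_letter_stats
  rw [pvOuter_length]
  simp

theorem pvB_eq_map (words : List String) :
    multiple_letter_stats_alt words
      = (List.range 26).map (fun k => (words.countP (pvHasDouble k) : Int)) := by
  unfold multiple_letter_stats_alt
  rw [PySem.List.foldl_append_singleton_eq_map, PySem.List.pyRange_one]
  simp only [List.map_map]
  apply List.map_congr_left
  intro k hk
  have hk26 : k < 26 := by simpa using hk
  simp only [Function.comp]
  have htn : ((65 : Int) + (0 + (k : Int))).toNat = 65 + k := by omega
  rw [PySem.List.foldl_ite_add_one, zero_add]
  congr 1
  apply List.countP_congr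
  intro w _
  simp only [pvHasDouble, htn]
  rw [PySem.Str.count_eq]
  simp [pvCount_singleton]

-- ===== VERDICT (by name: the statement is the Claim_ definition above) =====
theorem multiple_letter_stats_spec : Claim_equal_multiple_letter_stats := by
  intro words _
  unfold Spec_multiple_letter_stats
  rw [pvB_eq_map]
  apply List.ext_getElem
  · simp [pvA_length]
  · intro k h1 h2
    have hk : k < 26 := by simpa [pvA_length] using h1
    have := pvA_getD words k hk
    rw [List.getD_eq_getElem _ _ h1] at this
    simp [this]
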